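-- pv_equiv track=rewrite | github.com/AyushParikh/CSCA48_assignments | a2/temp.py | n_combinations
-- ===== SOURCE A (Python) =====
-- def n_combinations(s, n):
--     R"""(str, int) -> set of str
--     Return the set of all combinations of n characters in s.
--
--     >>> n_combinations('1234', 1) == {'1', '2', '3', '4'}
--     True
--     >>> n_combinations('1234', 2) == \
--     ... {'12', '13', '14', '23', '24', '34'}
--     True
--     >>> len(n_combinations('1234567890', 5)) == 252
--     True
--     """
--     # Base case: if n is zero, no combinations are possible
--     if(n == 0):
--         return set()
--
--     # Base case: if n is one, return the set of characters in s
--     if(n == 1):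
--         return set(s)
--
--     # Recursive decomposition:
--     else:
--         # Set to return
--         combs = set()
--
--         # For each char,
--         for i in range(len(s)):
--             char = s[i]
--
--             # Find the combinations of all characters of s to the right
--             # of the current char, with smaller n
--             smaller_combs = n_combinations(s[(i + 1):], (n - 1))
--
--             # Concatenate char with each combination in smaller_combs
--             # and add to combs
--             combs.update({(char + comb) for comb in smaller_combs})
--
--         return combs
-- ===== SOURCE B (Python) =====
-- def n_combinations(s, n):
--     # Bottom-up DP table instead of A's recursive recomputation:
--     # row[k] holds, in order, the k-char order-preserving combinations of the
--     # current suffix of s; each (suffix, k) subproblem is computed exactly once.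
--     if n <= 0 or n > len(s):
--         return set()
--     row = [['']] + [[] for _ in range(n)]
--     for c in reversed(s):
--         new = [['']]
--         for k in range(1, n + 1):
--             new.append([c + t for t in row[k - 1]] + row[k])
--         row = new
--     return set(row[n])
-- ===== Notes on version B (the rewrite author's own statement) =====
-- stated objective: alternative
-- what changed: Replaced A's n-ary recursion (which re-slices the string and recomputes every (suffix,k) subproblem under each parent, deduplicating with sets at every level) by a bottom-up DP table row[k] over the suffixes of s, computing each subproblem once and deduplicating once at the end.
import Mathlib
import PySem

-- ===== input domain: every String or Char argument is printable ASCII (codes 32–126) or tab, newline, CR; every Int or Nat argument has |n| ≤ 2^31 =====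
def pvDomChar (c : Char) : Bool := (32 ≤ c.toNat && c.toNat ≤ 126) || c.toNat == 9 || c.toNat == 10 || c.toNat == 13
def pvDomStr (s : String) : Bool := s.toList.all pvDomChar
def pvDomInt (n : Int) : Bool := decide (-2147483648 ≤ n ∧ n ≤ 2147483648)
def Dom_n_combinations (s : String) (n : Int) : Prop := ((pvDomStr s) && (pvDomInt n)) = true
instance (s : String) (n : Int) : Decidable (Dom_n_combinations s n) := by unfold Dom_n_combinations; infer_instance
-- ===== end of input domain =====

-- B replaces A's recursive recomputation of (suffix, k) subproblems by a bottom-up DP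
-- table over the suffixes of s, computing each subproblem once (objective: alternative).


-- Python's `char + comb` (prepend one character to a string); used by both ports.
def pvPrep (c : Char) (t : String) : String := String.ofList (c :: t.toList)

-- ===== PORT A =====
-- A's `for i in range(len(s)): char = s[i]; … n_combinations(s[(i+1):], n-1) …` visits
-- exactly the proper tails of s in order; the loop is transcribed as structural
-- iteration over those tails (`nCombsALoop`), carrying the accumulator set `combs`.
mutual
def nCombsA (cs : List Char) (n : Int) : List String :=
  if n == 0 then []                                                         -- return set()
  else if n == 1 then PySem.Set.ofList (cs.map (fun c => String.ofList [c])) -- return set(s)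
  else nCombsALoop cs n []                                                  -- combs = set(); loop
  termination_by (cs.length, 1)
def nCombsALoop (cs : List Char) (n : Int) (combs : List String) : List String :=
  match cs with
  | [] => combs
  | c :: rest =>
      -- combs.update({(char + comb) for comb in smaller_combs})
      nCombsALoop rest n
        (PySem.Set.update combs
          (PySem.Set.ofList ((nCombsA rest (n - 1)).map (pvPrep c))))
  termination_by (cs.length, 0)
  decreasing_by
  · simp [Prod.lex_def]
  · simp [Prod.lex_def]
end

def n_combinations (s : String) (n : Int) : List String := nCombsA s.toList n

-- ===== PORT B =====
-- Source B: `if n <= 0 or n > len(s): return set()`; then a DP table row[k] over the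
-- suffixes of s, built right-to-left; finally `set(row[n])`.
def n_combinations_alt (s : String) (n : Int) : List String :=
  if n ≤ 0 || PySem.Str.len s < n then []
  else
    let m := n.toNat
    let row := s.toList.reverse.foldl
      (fun row c =>
        [""] :: (List.range m).map (fun j =>
          ((row.getD j []).map (pvPrep c)) ++ row.getD (j + 1) []))
      ([""] :: List.replicate m [])
    PySem.Set.ofList (row.getD m [])

-- ===== PRECONDITION & SPEC =====
def Spec_n_combinations (s : String) (n : Int) (out : List String) : Prop := out = n_combinations_alt s n
instance (s : String) (n : Int) (out : List String) : Decidable (Spec_n_combinations s n out) := by unfold Spec_n_combinations; infer_instance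

-- ===== CLAIM (what is proved, stated in full; the proofs are below) =====
def Claim_equal_n_combinations : Prop := ∀ (s : String) (n : Int), Dom_n_combinations s n → Spec_n_combinations s n (n_combinations s n)

-- ===== LEMMAS AND PROOFS =====

-- The take/skip list of combinations: each combination generated exactly once, in the
-- order in which A's recursion first produces it (lexicographic in the index tuples).
def pvComb : List Char → Nat → List String
  | _, 0 => [""]
  | [], _ + 1 => []
  | c :: cs, k + 1 => (pvComb cs k).map (pvPrep c) ++ pvComb cs (k + 1)

lemma pvPrep_inj (c : Char) : Function.Injective (pvPrep c) := by
  intro a b h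
  have h2 := congrArg String.toList h
  simp [pvPrep] at h2
  have h3 := congrArg String.ofList h2
  simpa using h3

lemma ofList_map_inj {f : String → String} (hf : Function.Injective f) (l : List String) :
    PySem.Set.ofList (l.map f) = (PySem.Set.ofList l).map f := by
  induction l using List.reverseRecOn with
  | nil => rfl
  | append_singleton xs x ih =>
    rw [List.map_append, List.map_singleton, PySem.Set.ofList_append_singleton,
      PySem.Set.ofList_append_singleton, ih, PySem.Set.add_eq_ite, PySem.Set.add_eq_ite]
    by_cases hx : x ∈ PySem.Set.ofList xs
    · rw [if_pos hx, if_pos ((List.mem_map_of_injective hf).mpr hx)]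
    · rw [if_neg hx, if_neg (fun hc => hx ((List.mem_map_of_injective hf).mp hc)),
        List.map_append, List.map_singleton]

lemma ofList_map_ofList {f : String → String} (hf : Function.Injective f) (l : List String) :
    PySem.Set.ofList ((PySem.Set.ofList l).map f) = PySem.Set.ofList (l.map f) := by
  rw [← ofList_map_inj hf l]
  exact PySem.Set.ofList_ofList _

lemma update_ofList (s : PySem.Set String) (l : List String) :
    PySem.Set.update s (PySem.Set.ofList l) = PySem.Set.update s l := by
  rw [PySem.Set.update_eq_append_filter, PySem.Set.update_eq_append_filter,
    PySem.Set.ofList_ofList]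

-- congruence: update only depends on the dedup of its second argument
lemma update_congr (s : PySem.Set String) {l1 l2 : List String}
    (h : PySem.Set.ofList l1 = PySem.Set.ofList l2) :
    PySem.Set.update s l1 = PySem.Set.update s l2 := by
  rw [PySem.Set.update_eq_append_filter, PySem.Set.update_eq_append_filter, h]

-- the concatenated generation sequence of A's loop
def pvGenA (cs : List Char) (n : Int) : List String :=
  match cs with
  | [] => []
  | c :: rest => (nCombsA rest (n - 1)).map (pvPrep c) ++ pvGenA rest n

lemma loopA_eq (cs : List Char) (n : Int) :
    ∀ acc, nCombsALoop cs n acc = PySem.Set.update acc (pvGenA cs n) := by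
  induction cs with
  | nil => intro acc; rw [nCombsALoop, pvGenA, PySem.Set.update_nil]
  | cons c rest ih =>
    intro acc
    rw [nCombsALoop, ih, pvGenA, update_ofList, ← PySem.Set.update_append]

lemma comb_one (cs : List Char) : pvComb cs 1 = cs.map (fun c => String.ofList [c]) := by
  induction cs with
  | nil => rfl
  | cons c rest ih => simp [pvComb, ih, pvPrep]

lemma comb_big (cs : List Char) (k : Nat) (h : cs.length < k) : pvComb cs k = [] := by
  induction cs generalizing k with
  | nil =>
    match k, h with
    | k + 1, _ => rfl
  | cons c rest ih =>
    match k, h with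
    | k + 1, h =>
      rw [pvComb, ih k (by simpa using h), ih (k + 1) (by simp at h; omega)]
      rfl

lemma A_neg (fuel : Nat) (cs : List Char) (n : Int) (hf : cs.length ≤ fuel) (hn : n < 0) :
    nCombsA cs n = [] := by
  induction fuel generalizing cs n with
  | zero =>
    have hcs : cs = [] := List.eq_nil_of_length_eq_zero (Nat.le_zero.mp hf)
    subst hcs
    rw [nCombsA]
    simp only [beq_iff_eq]
    rw [if_neg (by omega), if_neg (by omega), loopA_eq, pvGenA, PySem.Set.update_nil]
  | succ f ih =>
    rw [nCombsA]
    simp only [beq_iff_eq]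
    rw [if_neg (by omega), if_neg (by omega), loopA_eq]
    have key : ∀ cs', cs'.length ≤ f + 1 → pvGenA cs' n = [] := by
      intro cs'
      induction cs' with
      | nil => intro _; rfl
      | cons c rest ihr =>
        intro h
        have hrest : rest.length ≤ f := by simp at h; omega
        rw [pvGenA, ih rest (n - 1) hrest (by omega), ihr (by simp at h; omega)]
        rfl
    rw [key cs hf, PySem.Set.update_nil]

lemma A_main (fuel : Nat) (cs : List Char) (n : Int) (hf : cs.length ≤ fuel) (hn : 1 ≤ n) :
    nCombsA cs n = PySem.Set.ofList (pvComb cs n.toNat) := by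
  induction fuel generalizing cs n with
  | zero =>
    have hcs : cs = [] := List.eq_nil_of_length_eq_zero (Nat.le_zero.mp hf)
    subst hcs
    by_cases h1 : n = 1
    · subst h1
      rw [nCombsA]
      norm_num
      rfl
    · rw [nCombsA]
      simp only [beq_iff_eq]
      rw [if_neg (by omega), if_neg h1, loopA_eq, pvGenA, PySem.Set.update_nil]
      have hm : ∃ m, n.toNat = m + 1 := ⟨n.toNat - 1, by omega⟩
      obtain ⟨m, hm⟩ := hm
      rw [hm]
      rfl
  | succ f ih =>
    by_cases h1 : n = 1
    · subst h1
      rw [nCombsA]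
      norm_num
      rw [comb_one]
    · have h2 : 2 ≤ n := by omega
      obtain ⟨m, hm⟩ : ∃ m, n.toNat = m + 1 := ⟨n.toNat - 1, by omega⟩
      rw [nCombsA]
      simp only [beq_iff_eq]
      rw [if_neg (by omega), if_neg h1, loopA_eq, PySem.Set.update_nil_left, hm]
      have key : ∀ cs', cs'.length ≤ f + 1 →
          PySem.Set.ofList (pvGenA cs' n) = PySem.Set.ofList (pvComb cs' (m + 1)) := by
        intro cs'
        induction cs' with
        | nil =>
          intro _
          rw [pvGenA]
          have : pvComb [] (m + 1) = [] := rfl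
          rw [this]
        | cons c rest ihr =>
          intro h
          have hrest : rest.length ≤ f := by simp at h; omega
          have hA : nCombsA rest (n - 1) = PySem.Set.ofList (pvComb rest m) := by
            rw [ih rest (n - 1) hrest (by omega)]
            congr 2
            omega
          rw [pvGenA, hA, pvComb, PySem.Set.ofList_append, PySem.Set.ofList_append,
            ofList_map_ofList (pvPrep_inj c),
            update_congr _ (ihr (by simp at h; omega))]
      exact key cs hf

lemma B_row (cs : List Char) (m : Nat) :
    cs.foldr
      (fun c row =>
        [""] :: (List.range m).map (fun j =>
          ((row.getD j []).map (pvPrep c)) ++ row.getD (j + 1) []))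
      ([""] :: List.replicate m [])
    = (List.range (m + 1)).map (pvComb cs) := by
  induction cs with
  | nil =>
    rw [List.foldr_nil]
    conv_rhs => rw [List.range_succ_eq_map, List.map_cons, List.map_map]
    congr 1
    have h0 : List.map (pvComb ([] : List Char) ∘ Nat.succ) (List.range m)
        = List.map (fun _ => ([] : List String)) (List.range m) :=
      List.map_congr_left (fun j _ => rfl)
    rw [h0, List.map_const', List.length_range]
  | cons c cs ih =>
    rw [List.foldr_cons, ih]
    have hg : ∀ j, j < m + 1 →
        (((List.range (m + 1)).map (pvComb cs)).getD j []) = pvComb cs j := by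
      intro j hj
      rw [List.getD_eq_getElem?_getD, List.getElem?_map, List.getElem?_range hj]
      rfl
    conv_rhs => rw [List.range_succ_eq_map, List.map_cons, List.map_map]
    congr 1
    apply List.map_congr_left
    intro j hj
    have hjm : j < m := List.mem_range.mp hj
    rw [hg j (by omega), hg (j + 1) (by omega)]
    rfl

-- ===== VERDICT (by name: the statement is the Claim_ definition above) =====
theorem n_combinations_spec : Claim_equal_n_combinations := by
  intro s n _
  unfold Spec_n_combinations n_combinations n_combinations_alt
  by_cases hn0 : n ≤ 0
  · rw [if_pos (by simp [hn0])]
    by_cases h0 : n = 0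
    · subst h0; rw [nCombsA]; norm_num
    · exact A_neg s.toList.length s.toList n le_rfl (by omega)
  · have hn1 : 1 ≤ n := by omega
    have hlen := PySem.Str.len_eq s
    rw [A_main s.toList.length s.toList n le_rfl hn1]
    by_cases hbig : PySem.Str.len s < n
    · rw [if_pos (by simp only [Bool.or_eq_true, decide_eq_true_eq]; right; exact hbig)]
      rw [comb_big s.toList n.toNat (by omega)]
      rfl
    · rw [if_neg (by simp only [Bool.or_eq_true, decide_eq_true_eq, not_or]; exact ⟨hn0, hbig⟩)]
      simp only [List.foldl_reverse]
      rw [B_row s.toList n.toNat]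
      rw [List.getD_eq_getElem?_getD, List.getElem?_map,
        List.getElem?_range (Nat.lt_succ_self n.toNat)]
      rfl
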